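-- pv_equiv track=rewrite | github.com/em3rald1/data-repo | Flagless_URCL_Emulator (2).py | readOps
-- ===== SOURCE A (Python) =====
-- def readOps(code, char):
--     temp = []
--     temp2 = ""
--     num = 0
--     while (char + num) < len(code):
--         if code[char + num] not in ",)":
--             temp2 += code[char + num]
--             num += 1
--         else:
--             if len(temp2) == 1:
--                 if temp2.isnumeric():
--                     temp2 = "0" + temp2
--             temp.append(temp2)
--             temp2 = ""
--             if code[char + num] == ")":
--                 break
--             num += 1
--     char += num + 1
--     if temp2 != "":
--         temp.append(temp2)
--     if temp == []:
--         pass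
--     elif temp[0] == "":
--         temp = []
--     return temp
-- ===== SOURCE B (Python) =====
-- def readOps(code, char):
--     seg = code[char:].split(')', 1)[0]
--     tokens = ['0' + t if len(t) == 1 and t.isnumeric() else t for t in seg.split(',')]
--     return [] if tokens[0] == '' else tokens
-- ===== Notes on version B (the rewrite author's own statement) =====
-- stated objective: simpler
-- what changed: Replaces A's index-walking while-loop state machine (manual per-character accumulator, break on ')') by a direct decomposition: take the part of code[char:] before the first ')', split it on ',', pad single-digit tokens in one comprehension, and collapse a leading empty token to []; Pre_ additionally excludes negative char, where A's 'code[char+num]' wraps to the end of the string or raises IndexError.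
-- intended difference: On unterminated input (no ')' at or after char) whose first operand is nonempty, A returns the final operand unpadded and silently drops it when empty (its state machine only pads/appends on seeing ',' or ')'), while B pads a single-digit final operand and keeps an empty one, exactly as both programs do when ')' is present; B's uniform treatment of operands is the intended behaviour. — e.g. on readOps("1,5", 0): A returns ["01", "5"], B returns ["01", "05"]
-- outside the precondition, e.g. on readOps('ab)c,5', -1): A returns ['5ab'], B returns ['05']
import Mathlib
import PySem

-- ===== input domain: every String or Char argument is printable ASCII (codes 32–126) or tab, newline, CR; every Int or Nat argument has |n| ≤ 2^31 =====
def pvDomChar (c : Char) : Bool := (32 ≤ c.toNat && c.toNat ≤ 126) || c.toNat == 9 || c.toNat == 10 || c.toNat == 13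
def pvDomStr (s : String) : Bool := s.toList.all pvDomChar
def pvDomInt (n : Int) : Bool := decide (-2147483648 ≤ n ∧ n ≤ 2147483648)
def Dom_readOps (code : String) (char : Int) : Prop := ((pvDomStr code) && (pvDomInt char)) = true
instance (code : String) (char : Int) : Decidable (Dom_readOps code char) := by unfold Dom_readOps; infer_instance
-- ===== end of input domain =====

-- B replaces A's index-walking while-loop state machine by split-at-')' / split(',') / one padding comprehension
-- (simpler decomposition; on unterminated input B treats the final operand like every other one — see D_ below).

-- ===== PORT A =====
-- 'len(temp2)==1 and temp2.isnumeric()' check + '"0"+temp2' padding; on the printable-ASCII domain isnumeric == isdigit (exact there)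
def pvPadA (t2 : List Char) : List Char :=
  if t2.length = 1 then (if PySem.Chars.strIsdigit t2 then '0' :: t2 else t2) else t2

-- the while loop of A: state (num, temp, temp2); returns the loop-exit state (temp, temp2).
-- fuel only makes the recursion structural: with fuel ≥ len(code)+1 - char it is never exhausted (A's loop runs
-- at most len(code) - (char+num) more iterations).
def readOpsLoop (code : List Char) (char : Int) : Nat → Int →
    List (List Char) → List Char → List (List Char) × List Char
  | 0, _, temp, temp2 => (temp, temp2)
  | fuel + 1, num, temp, temp2 =>
    if char + num < PySem.List.len code then
      match PySem.List.pyGet? code (char + num) with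
      | none => (temp, temp2)            -- Python raises IndexError here (char + num < -len); outside Pre_
      | some c =>
        if ¬ (c = ',' ∨ c = ')') then    -- code[char+num] not in ",)"
          readOpsLoop code char fuel (num + 1) temp (temp2 ++ [c])
        else
          let t2 := pvPadA temp2
          if c = ')' then (temp ++ [t2], [])   -- append then break (temp2 reset to "")
          else readOpsLoop code char fuel (num + 1) (temp ++ [t2]) []
    else (temp, temp2)

def readOps (code : String) (char : Int) : List String :=
  let r := readOpsLoop code.toList char (code.toList.length + 1) 0 [] []
  -- 'char += num + 1' rebinds a local that is never read again; omitted
  let temp := if r.2 ≠ [] then r.1 ++ [r.2] else r.1     -- if temp2 != "": temp.append(temp2)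
  (match temp with                                        -- if temp == []: pass / elif temp[0] == "": temp = []
   | [] => []
   | h :: _ => if h = [] then [] else temp).map (fun t => String.ofList t)

-- ===== PORT B =====
def pvPadB (t : List Char) : List Char :=
  if t.length = 1 ∧ PySem.Chars.strIsdigit t = true then '0' :: t else t

def readOps_alt (code : String) (char : Int) : List String :=
  let s := PySem.List.slice code.toList (some char) none          -- code[char:]
  let seg := s.takeWhile (fun c => c ≠ ')')                        -- .split(')', 1)[0]: the part before the first ')' (the whole string if absent) — exact
  let tokens := (PySem.Chars.splitOn seg [',']).map pvPadB         -- the padding comprehension over seg.split(',')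
  (match tokens with                                               -- return [] if tokens[0] == '' else tokens
   | [] => []                                                      -- unreachable: split never returns an empty list
   | h :: _ => if h = [] then [] else tokens).map (fun t => String.ofList t)

-- ===== PRECONDITION & SPEC =====
-- Pre_ excludes negative char, outside the parser's natural cursor domain: there Python's negative indexing makes A
-- wrap to the string's end and reread from the start (an accident of 'code[char+num]'), and raise IndexError for char < -len(code).
def Pre_readOps (code : String) (char : Int) : Prop := 0 ≤ char
instance (code : String) (char : Int) : Decidable (Pre_readOps code char) := by unfold Pre_readOps; infer_instance
def pvWitness_readOps : String × Int := ("1,25)", 0)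

-- On unterminated input (no ')' at or after char) with a nonempty first operand, A leaves the final operand
-- unpadded and silently drops it when empty — its state machine only pads/appends on seeing ',' or ')' — while
-- B pads a single-digit final operand and keeps an empty one, exactly as both programs do when ')' is present;
-- B's uniform treatment of the operands is the intended behaviour.
def D_readOps (code : String) (char : Int) : Prop :=
  let s := PySem.List.slice code.toList (some char) none
  let toks := PySem.Chars.splitOn s [',']
  ')' ∉ s ∧ toks.head? ≠ some [] ∧
    (toks.getLast? = some [] ∨
     toks.getLast?.any (fun t => t.length == 1 && PySem.Chars.strIsdigit t) = true)
instance (code : String) (char : Int) : Decidable (D_readOps code char) := by unfold D_readOps; infer_instance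

def Spec_readOps (code : String) (char : Int) (out : List String) : Prop := ¬ D_readOps code char → out = readOps_alt code char
instance (code : String) (char : Int) (out : List String) : Decidable (Spec_readOps code char out) := by unfold Spec_readOps; infer_instance

def pvDiffWitness_readOps : String × Int := ("1,5", 0)
def pvDiffWitnessOut_readOps : (List String) × (List String) := (["01", "5"], ["01", "05"])

-- ===== CLAIM (what is proved, stated in full; the proofs are below) =====
def Claim_unchanged_readOps : Prop := ∀ (code : String) (char : Int), Dom_readOps code char → Pre_readOps code char → Spec_readOps code char (readOps code char)
def Claim_changed_readOps : Prop := Dom_readOps (pvDiffWitness_readOps.1) (pvDiffWitness_readOps.2) ∧ Pre_readOps (pvDiffWitness_readOps.1) (pvDiffWitness_readOps.2) ∧ D_readOps (pvDiffWitness_readOps.1) (pvDiffWitness_readOps.2) ∧ readOps (pvDiffWitness_readOps.1) (pvDiffWitness_readOps.2) = pvDiffWitnessOut_readOps.1 ∧ readOps_alt (pvDiffWitness_readOps.1) (pvDiffWitness_readOps.2) = pvDiffWitnessOut_readOps.2 ∧ pvDiffWitnessOut_readOps.1 ≠ pvDiffWitnessOut_readOps.2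
def Claim_exact_readOps : Prop := ∀ (code : String) (char : Int), Dom_readOps code char → Pre_readOps code char → D_readOps code char → readOps code char ≠ readOps_alt code char

-- ===== LEMMAS AND PROOFS =====

-- tokens produced by A's loop from the remaining input s with pending accumulator t2 (loop + its post-loop append)
def pvTok : List Char → List Char → List (List Char)
  | [], t2 => if t2 = [] then [] else [t2]
  | c :: s, t2 =>
    if c = ',' then pvPadA t2 :: pvTok s []
    else if c = ')' then [pvPadA t2]
    else pvTok s (t2 ++ [c])

def pvFin (r : List (List Char) × List Char) : List (List Char) :=
  if r.2 ≠ [] then r.1 ++ [r.2] else r.1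

-- A-side characterisation of the raw loop
theorem loopA_tok (code : List Char) :
    ∀ (fuel : Nat) (char num : Int) (temp : List (List Char)) (temp2 : List Char),
      0 ≤ char + num → (code.length : Int) - (char + num) ≤ fuel →
      pvFin (readOpsLoop code char fuel num temp temp2)
        = temp ++ pvTok (code.drop (char + num).toNat) temp2 := by
  intro fuel
  induction fuel with
  | zero =>
    intro char num temp temp2 h0 hN
    rw [readOpsLoop, List.drop_of_length_le (by omega)]
    by_cases ht : temp2 = [] <;> simp [pvFin, pvTok, ht]
  | succ N ih =>
    intro char num temp temp2 h0 hN
    by_cases hlt : char + num < (code.length : Int)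
    · have hk : (char + num).toNat < code.length := by omega
      have hget : PySem.List.pyGet? code (char + num) = some code[(char + num).toNat] :=
        PySem.List.pyGet?_eq_some_getElem code h0 (by exact_mod_cast hlt)
      have hdrop : code.drop (char + num).toNat
          = code[(char + num).toNat] :: code.drop ((char + num).toNat + 1) :=
        (List.getElem_cons_drop hk).symm
      rw [readOpsLoop, if_pos (by simpa [PySem.List.len_eq] using hlt), hget]
      set c := code[(char + num).toNat] with hc
      dsimp only
      have hsucc : (char + (num + 1)).toNat = (char + num).toNat + 1 := by omega
      rw [hdrop]
      by_cases hcm : c = ','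
      · rw [if_neg (by simp [hcm]), if_neg (by simp [hcm])]
        rw [ih char (num + 1) (temp ++ [pvPadA temp2]) [] (by omega) (by omega), hsucc]
        simp [pvTok, hcm]
      · by_cases hcp : c = ')'
        · rw [if_neg (by simp [hcp]), if_pos hcp]
          simp [pvFin, pvTok, hcp]
        · rw [if_pos (by simp [hcm, hcp])]
          rw [ih char (num + 1) temp (temp2 ++ [c]) (by omega) (by omega), hsucc]
          simp [pvTok, hcm, hcp]
    · rw [readOpsLoop, if_neg (by simp only [PySem.List.len_eq]; omega)]
      rw [List.drop_of_length_le (by omega)]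
      by_cases ht : temp2 = [] <;> simp [pvFin, pvTok, ht]

theorem pvModifyHead_fun_id {α : Type} (l : List α) : List.modifyHead (fun x => x) l = l := by
  cases l <;> simp

-- structural form of seg.split(',')
def pvSplitC : List Char → List (List Char)
  | [] => [[]]
  | c :: s => if c = ',' then [] :: pvSplitC s else (pvSplitC s).modifyHead (c :: ·)

theorem splitC_ne_nil (s : List Char) : pvSplitC s ≠ [] := by
  cases s with
  | nil => simp [pvSplitC]
  | cons c s =>
    simp only [pvSplitC]
    split
    · simp
    · have := splitC_ne_nil s
      intro h
      rw [← List.length_eq_zero_iff, List.length_modifyHead, List.length_eq_zero_iff] at h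
      exact this h

theorem go_comma : ∀ (fuel : Nat) (s cur : List Char) (acc : List (List Char)), s.length < fuel →
    PySem.Chars.splitOn.go [','] fuel s cur acc
      = acc.reverse ++ (pvSplitC s).modifyHead (cur.reverse ++ ·) := by
  intro fuel
  induction fuel with
  | zero => intro s cur acc h; omega
  | succ fuel ih =>
    intro s cur acc h
    cases s with
    | nil => simp [PySem.Chars.splitOn.go, pvSplitC]
    | cons c rest =>
      simp only [PySem.Chars.splitOn.go]
      by_cases hc : c = ','
      · subst hc
        rw [if_pos (by simp)]
        simp only [List.length_singleton, List.drop_one, List.tail_cons]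
        rw [ih rest [] (cur.reverse :: acc) (by simpa using Nat.lt_of_succ_lt_succ h)]
        simp [pvSplitC, pvModifyHead_fun_id]
      · rw [if_neg (by simp [List.isPrefixOf, Ne.symm hc])]
        rw [ih rest (c :: cur) acc (by simpa using Nat.lt_of_succ_lt_succ h)]
        simp only [pvSplitC, if_neg hc, List.reverse_cons]
        rw [List.modifyHead_modifyHead]
        simp [Function.comp_def]

theorem splitOn_comma (s : List Char) : PySem.Chars.splitOn s [','] = pvSplitC s := by
  rw [PySem.Chars.splitOn, go_comma (s.length+1) s [] [] (by omega)]
  simp [pvModifyHead_fun_id]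

theorem splitC_append (t2 s : List Char) (h : ∀ c ∈ t2, c ≠ ',') :
    pvSplitC (t2 ++ s) = (pvSplitC s).modifyHead (t2 ++ ·) := by
  induction t2 with
  | nil => simp [pvModifyHead_fun_id]
  | cons c t2 ih =>
    have hc : c ≠ ',' := h c (by simp)
    simp only [List.cons_append, pvSplitC, if_neg hc]
    rw [ih (fun a ha => h a (by simp [ha]))]
    rw [List.modifyHead_modifyHead]
    rfl

-- the two pad functions agree
theorem padB_eq_padA (t : List Char) : pvPadB t = pvPadA t := by
  unfold pvPadB pvPadA
  by_cases h1 : t.length = 1 <;> by_cases h2 : PySem.Chars.strIsdigit t = true <;> simp [h1, h2]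

theorem padA_ne_nil (t : List Char) (h : t ≠ []) : pvPadA t ≠ [] := by
  unfold pvPadA; split_ifs <;> simp [h]

-- A's tokens when the loop runs off the end: all but the last padded, an empty last token dropped
def padInit : List (List Char) → List (List Char)
  | [] => []
  | [t] => if t = [] then [] else [t]
  | t :: ts => pvPadA t :: padInit ts

theorem padInit_cons (t : List Char) (l : List (List Char)) (h : l ≠ []) :
    padInit (t :: l) = pvPadA t :: padInit l := by
  cases l with
  | nil => exact absurd rfl h
  | cons a as => rfl

theorem padInit_append (ts : List (List Char)) (t : List Char) :
    padInit (ts ++ [t]) = ts.map pvPadA ++ (if t = [] then [] else [t]) := by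
  induction ts with
  | nil => simp [padInit]
  | cons a as ih =>
    rw [List.cons_append, padInit_cons a (as ++ [t]) (by simp), ih]
    simp

theorem takeWhile_no_paren (s : List Char) (h : ')' ∉ s) :
    s.takeWhile (fun c => c ≠ ')') = s := by
  rw [List.takeWhile_eq_self_iff]
  intro c hc
  simp only [decide_eq_true_eq, ne_eq]
  rintro rfl
  exact h hc

-- characterisation of A's token stream via split-at-')' and split-on-','
theorem tok_char : ∀ (s t2 : List Char), (∀ c ∈ t2, c ≠ ',' ∧ c ≠ ')') →
    pvTok s t2
      = if ')' ∈ s then (pvSplitC (t2 ++ s.takeWhile (fun c => c ≠ ')'))).map pvPadA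
        else padInit (pvSplitC (t2 ++ s.takeWhile (fun c => c ≠ ')'))) := by
  intro s
  induction s with
  | nil =>
    intro t2 h
    have hsp : pvSplitC t2 = [t2] := by
      simpa [pvSplitC, List.modifyHead] using splitC_append t2 [] (fun c hc => (h c hc).1)
    simp only [List.not_mem_nil, if_false, List.takeWhile_nil, List.append_nil, hsp]
    by_cases ht : t2 = [] <;> simp [pvTok, padInit, ht]
  | cons c s' ih =>
    intro t2 h
    by_cases hcp : c = ')'
    · subst hcp
      have hsp : pvSplitC t2 = [t2] := by
        simpa [pvSplitC, List.modifyHead] using splitC_append t2 [] (fun c hc => (h c hc).1)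
      simp [pvTok, hsp, (by decide : ¬((')':Char) = ','))]
    · by_cases hcm : c = ','
      · subst hcm
        have htw : (',' :: s').takeWhile (fun c => c ≠ ')') = ',' :: s'.takeWhile (fun c => c ≠ ')') := by
          simp
        have hsp : pvSplitC (t2 ++ ',' :: s'.takeWhile (fun c => c ≠ ')'))
            = t2 :: pvSplitC (s'.takeWhile (fun c => c ≠ ')')) := by
          rw [splitC_append t2 _ (fun a ha => (h a ha).1)]
          simp [pvSplitC, List.modifyHead]
        have hIH := ih [] (by simp)
        simp only [List.nil_append] at hIH
        show pvPadA t2 :: pvTok s' [] = _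
        rw [htw, hsp]
        by_cases hp : ')' ∈ s'
        · rw [if_pos (List.mem_cons_of_mem ',' hp), hIH, if_pos hp]
          simp
        · rw [if_neg (by simp only [List.mem_cons, not_or]; exact ⟨by decide, hp⟩)]
          rw [padInit_cons t2 _ (splitC_ne_nil _), hIH, if_neg hp]
      · have htw : (c :: s').takeWhile (fun c => c ≠ ')') = c :: s'.takeWhile (fun c => c ≠ ')') := by
          simp [hcp]
        have hre : t2 ++ c :: s'.takeWhile (fun c => c ≠ ')')
            = (t2 ++ [c]) ++ s'.takeWhile (fun c => c ≠ ')') := by simp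
        have hIH := ih (t2 ++ [c]) (by
          intro a ha
          rcases List.mem_append.mp ha with ha | ha
          · exact h a ha
          · simp at ha; subst ha; exact ⟨hcm, hcp⟩)
        simp only [pvTok, if_neg hcm, if_neg hcp]
        rw [htw, hre, hIH]
        by_cases hp : ')' ∈ s'
        · rw [if_pos hp, if_pos (List.mem_cons_of_mem c hp)]
        · rw [if_neg hp,
            if_neg (by simp only [List.mem_cons, not_or]; exact ⟨fun h' => hcp h'.symm, hp⟩)]

-- the shared post-processing: the [''] → [] collapse followed by the List Char → String conversion
def pvOut (l : List (List Char)) : List String :=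
  (match l with
   | [] => []
   | h :: _ => if h = [] then [] else l).map (fun t => String.ofList t)

theorem readOps_eq (code : String) (char : Int) (h : 0 ≤ char) :
    readOps code char = pvOut (pvTok (code.toList.drop char.toNat) []) := by
  unfold readOps pvOut
  dsimp only
  have hA := loopA_tok code.toList (code.toList.length + 1) char 0 [] []
      (by simpa using h) (by omega)
  simp only [add_zero] at hA
  have hfin : (if (readOpsLoop code.toList char (code.toList.length + 1) 0 [] []).2 ≠ []
      then (readOpsLoop code.toList char (code.toList.length + 1) 0 [] []).1
        ++ [(readOpsLoop code.toList char (code.toList.length + 1) 0 [] []).2]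
      else (readOpsLoop code.toList char (code.toList.length + 1) 0 [] []).1)
      = pvTok (code.toList.drop char.toNat) [] := by
    simpa [pvFin] using hA
  rw [hfin]

theorem alt_eq (code : String) (char : Int) (h : 0 ≤ char) :
    readOps_alt code char
      = pvOut ((pvSplitC ((code.toList.drop char.toNat).takeWhile (fun c => c ≠ ')'))).map pvPadA) := by
  unfold readOps_alt pvOut
  simp only [PySem.List.slice_from code.toList h, splitOn_comma,
    show pvPadB = pvPadA from funext padB_eq_padA]

theorem pvOut_head_ne (l : List (List Char)) (h : List Char) (hs : List (List Char))
    (he : l = h :: hs) (hne : h ≠ []) : pvOut l = l.map (fun t => String.ofList t) := by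
  subst he; simp [pvOut, hne]

theorem ofList_map_ne (l l' : List (List Char)) (h : l ≠ l') :
    l.map (fun t => String.ofList t) ≠ l'.map (fun t => String.ofList t) := by
  intro he
  apply h
  refine List.map_injective_iff.mpr ?_ he
  intro a b hab
  have := congrArg String.toList hab
  simpa using this

-- main list-level equality outside the difference region
theorem main_eq (s : List Char)
    (hnD : ¬ (')' ∉ s ∧ (pvSplitC s).head? ≠ some [] ∧
        ((pvSplitC s).getLast? = some [] ∨
         (pvSplitC s).getLast?.any (fun t => t.length == 1 && PySem.Chars.strIsdigit t) = true))) :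
    pvOut (pvTok s []) = pvOut ((pvSplitC (s.takeWhile (fun c => c ≠ ')'))).map pvPadA) := by
  have htc := tok_char s [] (by simp)
  simp only [List.nil_append] at htc
  by_cases hp : ')' ∈ s
  · rw [htc, if_pos hp]
  · rw [htc, if_neg hp, takeWhile_no_paren s hp]
    obtain ⟨t0, rest, hts⟩ := List.exists_cons_of_ne_nil (splitC_ne_nil s)
    by_cases ht0 : t0 = []
    · subst ht0
      rw [hts]
      cases rest with
      | nil => simp [padInit, pvOut, pvPadA]
      | cons a as =>
        rw [padInit_cons [] (a :: as) (by simp)]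
        simp [pvOut, pvPadA]
    · -- first token nonempty: ¬D forces the last token to be neither empty nor a single digit
      have hlastc : ¬ ((pvSplitC s).getLast? = some [] ∨
          (pvSplitC s).getLast?.any (fun t => t.length == 1 && PySem.Chars.strIsdigit t) = true) := by
        intro hl
        exact hnD ⟨hp, by rw [hts]; simp [ht0], hl⟩
      have hne : pvSplitC s ≠ [] := splitC_ne_nil s
      have hdec : (pvSplitC s).dropLast ++ [(pvSplitC s).getLast hne] = pvSplitC s :=
        List.dropLast_append_getLast hne
      set t := (pvSplitC s).getLast hne with htdef
      have hlast? : (pvSplitC s).getLast? = some t := List.getLast?_eq_some_getLast hne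
      rw [hlast?] at hlastc
      push Not at hlastc
      obtain ⟨hl1, hl2⟩ := hlastc
      have htne : t ≠ [] := fun he => hl1 (by rw [he])
      have hpad : pvPadA t = t := by
        unfold pvPadA
        split_ifs with h1 h2
        · exfalso; apply hl2; simp [h1, h2]
        · rfl
        · rfl
      rw [← hdec, padInit_append, if_neg htne, List.map_append]
      simp [hpad]

-- ===== VERDICT (by name: the statements are the Claim_ definitions above) =====
theorem readOps_spec : Claim_unchanged_readOps := by
  intro code char _hdom hpre
  unfold Spec_readOps
  intro hnD
  unfold D_readOps at hnD
  simp only [PySem.List.slice_from code.toList hpre, splitOn_comma] at hnD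
  rw [readOps_eq code char hpre, alt_eq code char hpre]
  exact main_eq _ hnD

theorem readOps_changed : Claim_changed_readOps := by
  unfold Claim_changed_readOps; decide

theorem readOps_tight : Claim_exact_readOps := by
  intro code char _hdom hpre hD
  unfold D_readOps at hD
  simp only [PySem.List.slice_from code.toList hpre, splitOn_comma] at hD
  obtain ⟨hp, hhead, hlast⟩ := hD
  rw [readOps_eq code char hpre, alt_eq code char hpre, takeWhile_no_paren _ hp]
  have htc := tok_char (code.toList.drop char.toNat) [] (by simp)
  simp only [List.nil_append, if_neg hp, takeWhile_no_paren _ hp] at htc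
  rw [htc]
  set toks := pvSplitC (code.toList.drop char.toNat) with htoksdef
  have hne : toks ≠ [] := splitC_ne_nil _
  obtain ⟨t0, rest, hts⟩ := List.exists_cons_of_ne_nil hne
  have ht0 : t0 ≠ [] := by
    intro he
    exact hhead (by rw [hts, he]; rfl)
  -- both heads survive the [''] → [] collapse
  have hheadInit : ∃ h hs, padInit toks = h :: hs ∧ h ≠ [] := by
    rw [hts]
    cases rest with
    | nil => exact ⟨t0, [], by simp [padInit, ht0], ht0⟩
    | cons a as =>
      exact ⟨pvPadA t0, padInit (a :: as), by rw [padInit_cons t0 (a :: as) (by simp)],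
        padA_ne_nil t0 ht0⟩
  have hheadMap : ∃ h hs, toks.map pvPadA = h :: hs ∧ h ≠ [] := by
    rw [hts]
    exact ⟨pvPadA t0, (rest).map pvPadA, by simp, padA_ne_nil t0 ht0⟩
  obtain ⟨hI, hIs, hIeq, hIne⟩ := hheadInit
  obtain ⟨hM, hMs, hMeq, hMne⟩ := hheadMap
  -- the underlying token lists differ at the last position
  have hlast? : toks.getLast? = some (toks.getLast hne) := List.getLast?_eq_some_getLast hne
  set t := toks.getLast hne with htdef
  have hdec : toks.dropLast ++ [t] = toks := List.dropLast_append_getLast hne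
  have hlists : padInit toks ≠ toks.map pvPadA := by
    rw [← hdec, padInit_append, List.map_append]
    rcases hlast with hl | hl
    · -- empty last token: the lengths differ
      rw [hlast?] at hl
      have ht : t = [] := by injection hl
      rw [if_pos ht]
      intro he
      have := congrArg List.length he
      simp at this
    · -- single-digit last token: '0' is prepended on one side only
      rw [hlast?] at hl
      simp only [Option.any_some, Bool.and_eq_true, beq_iff_eq] at hl
      obtain ⟨hlen, hdig⟩ := hl
      have htne : t ≠ [] := by intro he; rw [he] at hlen; simp at hlen
      rw [if_neg htne]
      intro he
      have h2 : [t] = [pvPadA t] := List.append_cancel_left he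
      have h3 : t = pvPadA t := by injection h2
      unfold pvPadA at h3
      rw [if_pos hlen, if_pos hdig] at h3
      have := congrArg List.length h3
      simp at this
  -- lift the inequality through the collapse and the String conversion
  rw [pvOut_head_ne _ hI hIs hIeq hIne, pvOut_head_ne _ hM hMs hMeq hMne]
  exact ofList_map_ne _ _ hlists
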